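-- pv_equiv track=rewrite | github.com/yantor3d/AdventOfCode2021 | aoc/day_14.py | solve
-- ===== SOURCE A (Python) =====
-- import collections
--
-- def solve(data, rules):
--     result = collections.Counter(data)
--     update = collections.Counter()
--
--     for old, num in result.items():
--         a, b = rules[old]
--
--         update[old] -= num
--         update[a] += num
--         update[b] += num
--
--     for k, v in update.items():
--         result[k] += v
--
--     result = {k: v for k, v in result.items() if v}
--
--     return result
-- ===== SOURCE B (Python) =====
-- def solve(data, rules):
--     # Gather formulation: first compute the output key order (existing keys, then
--     # derived keys by first appearance), then for each key SUM the contributions of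
--     # every input pair whose rule produces it -- a per-key gather instead of A's
--     # per-input scatter with subtract/merge phases.
--     order = list(data)
--     present = set(order)
--     for old in data:
--         for k in rules[old]:
--             if k not in present:
--                 present.add(k)
--                 order.append(k)
--     result = {}
--     for k in order:
--         v = sum(num * ((rules[old][0] == k) + (rules[old][1] == k))
--                 for old, num in data.items())
--         if v:
--             result[k] = v
--     return result
-- ===== Notes on version B (the rewrite author's own statement) =====
-- stated objective: alternative
-- what changed: B inverts the traversal: instead of A's per-input scatter (seed a Counter, subtract the old pair into a delta Counter, add the two derived pairs, merge, filter), B first computes the output key order and then GATHERS each key's value by summing, over all input pairs, the contributions their rules make to that key; it trades A's linear scatter for a per-key summation pass.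
import Mathlib
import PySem

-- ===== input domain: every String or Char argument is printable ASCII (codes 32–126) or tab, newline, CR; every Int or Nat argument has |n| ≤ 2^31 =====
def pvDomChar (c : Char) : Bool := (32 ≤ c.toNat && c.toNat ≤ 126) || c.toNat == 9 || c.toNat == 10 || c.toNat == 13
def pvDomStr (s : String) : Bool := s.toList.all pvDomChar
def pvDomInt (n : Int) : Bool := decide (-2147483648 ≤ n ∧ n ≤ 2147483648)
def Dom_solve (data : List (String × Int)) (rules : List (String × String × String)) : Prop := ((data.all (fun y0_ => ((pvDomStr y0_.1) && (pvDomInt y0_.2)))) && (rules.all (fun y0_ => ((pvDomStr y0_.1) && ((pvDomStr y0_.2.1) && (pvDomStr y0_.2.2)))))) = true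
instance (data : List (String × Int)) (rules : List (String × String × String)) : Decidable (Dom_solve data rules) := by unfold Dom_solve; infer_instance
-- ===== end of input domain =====

-- B inverts the traversal (objective: alternative): it computes the output key order
-- first and then GATHERS each key's value by summing all input contributions to it,
-- instead of A's per-input scatter with seed/subtract-delta/merge phases.

-- ===== PORT A =====
def solve (data : List (String × Int)) (rules : List (String × String × String)) : List (String × Int) :=
  let rulesD : PySem.Dict String (String × String) := PySem.Dict.ofList rules
  let result : PySem.Dict String Int := PySem.Dict.ofList data   -- collections.Counter(data)
  -- for old, num in result.items(): a, b = rules[old]; update[old] -= num; update[a] += num; update[b] += num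
  let update : PySem.Dict String Int :=
    result.items.foldl (fun u p =>
        let ab := rulesD.getD p.1 ("", "")   -- rules[old]; Pre_solve guarantees the key exists (else KeyError)
        ((u.modify p.1 0 (· - p.2)).modify ab.1 0 (· + p.2)).modify ab.2 0 (· + p.2))
      PySem.Dict.empty
  -- for k, v in update.items(): result[k] += v
  let result2 : PySem.Dict String Int :=
    update.items.foldl (fun r q => r.modify q.1 0 (· + q.2)) result
  -- {k: v for k, v in result.items() if v}
  result2.items.filter (fun p => p.2 != 0)

-- ===== PORT B =====
def solve_alt (data : List (String × Int)) (rules : List (String × String × String)) : List (String × Int) :=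
  let rulesD : PySem.Dict String (String × String) := PySem.Dict.ofList rules
  let d : PySem.Dict String Int := PySem.Dict.ofList data
  -- order = list(data); present = set(order)
  -- for old in data: for k in rules[old]: if k not in present: present.add(k); order.append(k)
  let st : List String × PySem.Set String :=
    d.keys.foldl (fun st old =>
        let ab := rulesD.getD old ("", "")
        [ab.1, ab.2].foldl (fun st k =>
            if k ∈ st.2 then st else (st.1 ++ [k], st.2.add k)) st)
      (d.keys, PySem.Set.ofList d.keys)
  -- result = {}; for k in order: v = sum(num*((rules[old][0]==k)+(rules[old][1]==k)) …); if v: result[k] = v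
  st.1.foldl (fun res k =>
      let v : Int := d.items.foldl (fun s p =>
          let ab := rulesD.getD p.1 ("", "")
          s + p.2 * ((if ab.1 = k then (1 : Int) else 0) + (if ab.2 = k then (1 : Int) else 0))) 0
      if v ≠ 0 then res ++ [(k, v)] else res) []

-- ===== PRECONDITION & SPEC =====
-- Pre_solve excludes exactly the inputs on which A raises KeyError: some key of data has no rule.
def Pre_solve (data : List (String × Int)) (rules : List (String × String × String)) : Prop :=
  ∀ p ∈ data, p.1 ∈ rules.map Prod.fst
instance (data : List (String × Int)) (rules : List (String × String × String)) : Decidable (Pre_solve data rules) := by unfold Pre_solve; infer_instance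
def pvWitness_solve : (List (String × Int)) × (List (String × String × String)) :=
  ([("AB", 2), ("BC", 1)], [("AB", "AC", "CB"), ("BC", "BA", "AC")])

def Spec_solve (data : List (String × Int)) (rules : List (String × String × String)) (out : List (String × Int)) : Prop := out = solve_alt data rules
instance (data : List (String × Int)) (rules : List (String × String × String)) (out : List (String × Int)) : Decidable (Spec_solve data rules out) := by unfold Spec_solve; infer_instance

-- ===== CLAIM (what is proved, stated in full; the proofs are below) =====
def Claim_equal_solve : Prop := ∀ (data : List (String × Int)) (rules : List (String × String × String)), Dom_solve data rules → Pre_solve data rules → Spec_solve data rules (solve data rules)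

-- ===== LEMMAS AND PROOFS =====

-- one '+=' step on a counter, and a run of them over a list of (key, increment) ops
def pvStep (d : PySem.Dict String Int) (q : String × Int) : PySem.Dict String Int :=
  d.modify q.1 0 (· + q.2)
def pvAddAll (d : PySem.Dict String Int) (ops : List (String × Int)) : PySem.Dict String Int :=
  ops.foldl pvStep d

-- the (key, increment) ops one data item contributes in A's update loop resp. a direct build
def pvOpsA (r : PySem.Dict String (String × String)) (p : String × Int) : List (String × Int) :=
  [(p.1, -p.2), ((r.getD p.1 ("", "")).1, p.2), ((r.getD p.1 ("", "")).2, p.2)]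
def pvOpsB (r : PySem.Dict String (String × String)) (p : String × Int) : List (String × Int) :=
  [((r.getD p.1 ("", "")).1, p.2), ((r.getD p.1 ("", "")).2, p.2)]

-- total increment a list of ops applies to key k
def pvSumAt : List (String × Int) → String → Int
  | [], _ => 0
  | q :: l, k => (if q.1 = k then q.2 else 0) + pvSumAt l k

lemma pvSumAt_append (l1 l2 : List (String × Int)) (k : String) :
    pvSumAt (l1 ++ l2) k = pvSumAt l1 k + pvSumAt l2 k := by
  induction l1 with
  | nil => simp [pvSumAt]
  | cons q l ih => simp [pvSumAt, ih]; ring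

lemma getD_pvAddAll (ops : List (String × Int)) (d : PySem.Dict String Int) (k : String) :
    (pvAddAll d ops).getD k 0 = d.getD k 0 + pvSumAt ops k := by
  induction ops generalizing d with
  | nil => simp [pvAddAll, pvSumAt]
  | cons q ops ih =>
    show (pvAddAll (pvStep d q) ops).getD k 0 = _
    rw [ih]
    simp only [pvStep, PySem.Dict.getD_modify, pvSumAt]
    split_ifs with h1 h2
    · subst h1; ring
    · exact absurd h1.symm h2
    · exact absurd ‹q.1 = k›.symm h1
    · ring

lemma keys_pvAddAll (ops : List (String × Int)) (d : PySem.Dict String Int) :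
    (pvAddAll d ops).keys = PySem.Set.update d.keys (ops.map Prod.fst) := by
  simpa only [pvAddAll, pvStep] using
    PySem.Dict.keys_foldl_modify_key ops Prod.fst 0 (fun _ q v => v + q.2) d

lemma nodup_keys_pvAddAll (ops : List (String × Int)) (d : PySem.Dict String Int)
    (h : d.keys.Nodup) : (pvAddAll d ops).keys.Nodup := by
  simpa only [pvAddAll, pvStep] using
    PySem.Dict.nodup_keys_foldl_modify_key ops Prod.fst 0 (fun _ q v => v + q.2) d h

lemma pvSumAt_map_keys (ks : List String) (g : String → Int) (k : String) (h : ks.Nodup) :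
    pvSumAt (ks.map (fun j => (j, g j))) k = if k ∈ ks then g k else 0 := by
  induction ks with
  | nil => simp [pvSumAt]
  | cons x ks ih =>
    simp only [List.nodup_cons] at h
    simp only [List.map_cons, pvSumAt, ih h.2, List.mem_cons]
    by_cases hx : x = k
    · subst hx
      simp [if_neg (fun hk => h.1 hk)]
    · simp [hx, Ne.symm hx]

lemma pvSumAt_items (d : PySem.Dict String Int) (k : String) (h : d.keys.Nodup) :
    pvSumAt d.items k = d.getD k 0 := by
  rw [PySem.Dict.items_eq_map_keys d h 0]
  rw [pvSumAt_map_keys d.keys (fun j => d.getD j 0) k h]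
  split_ifs with hk
  · rfl
  · refine (PySem.Dict.getD_of_not_contains d 0 ?_).symm
    by_contra hc
    exact hk ((PySem.Dict.contains_iff_mem_keys d k).mp (by revert hc; cases d.contains k <;> simp))

-- Set.update distributes over an 'add' in its second argument
lemma pv_update_add (s t : PySem.Set String) (x : String) :
    PySem.Set.update s (t.add x) = (PySem.Set.update s t).add x := by
  by_cases hx : x ∈ t
  · rw [PySem.Set.add_of_mem hx,
      PySem.Set.add_of_mem (by exact (PySem.Set.mem_update s t x).mpr (Or.inr hx))]
  · rw [PySem.Set.add_of_not_mem hx, PySem.Set.update_eq_foldl, List.foldl_append,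
      ← PySem.Set.update_eq_foldl]
    rfl

lemma pv_update_update (l : List String) (s t : PySem.Set String) :
    PySem.Set.update s (PySem.Set.update t l) = PySem.Set.update (PySem.Set.update s t) l := by
  induction l generalizing t with
  | nil => rfl
  | cons x l ih =>
    have h1 : PySem.Set.update t (x :: l) = PySem.Set.update (t.add x) l := rfl
    have h2 : PySem.Set.update (PySem.Set.update s t) (x :: l)
        = PySem.Set.update ((PySem.Set.update s t).add x) l := rfl
    rw [h1, h2, ih, pv_update_add]

lemma pv_update_of_disjoint_nodup (l : List String) (s : PySem.Set String)
    (h : (s ++ l).Nodup) : PySem.Set.update s l = s ++ l := by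
  induction l generalizing s with
  | nil => simp [PySem.Set.update_eq_foldl]
  | cons x l ih =>
    have hx : x ∉ s := by
      intro hmem
      rw [List.nodup_append] at h
      exact h.2.2 x hmem x (by simp) rfl
    have h1 : PySem.Set.update s (x :: l) = PySem.Set.update (s.add x) l := rfl
    rw [h1, PySem.Set.add_of_not_mem hx, ih (s ++ [x]) (by simpa using h)]
    simp

-- interleaved no-op adds of keys already present cancel: A's key stream equals the derived-only stream
lemma pv_update_cancel (r : PySem.Dict String (String × String)) (L : List (String × Int))
    (s : PySem.Set String) (hs : ∀ p ∈ L, p.1 ∈ s) :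
    PySem.Set.update s (L.flatMap fun p => (pvOpsA r p).map Prod.fst)
      = PySem.Set.update s (L.flatMap fun p => (pvOpsB r p).map Prod.fst) := by
  induction L generalizing s with
  | nil => rfl
  | cons p L ih =>
    have hp : p.1 ∈ s := hs p (by simp)
    have hLA : PySem.Set.update s ((p :: L).flatMap fun p => (pvOpsA r p).map Prod.fst)
        = PySem.Set.update (((s.add p.1).add (r.getD p.1 ("", "")).1).add (r.getD p.1 ("", "")).2)
            (L.flatMap fun p => (pvOpsA r p).map Prod.fst) := by
      rw [List.flatMap_cons, PySem.Set.update_eq_foldl, List.foldl_append,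
        ← PySem.Set.update_eq_foldl]
      rfl
    have hLB : PySem.Set.update s ((p :: L).flatMap fun p => (pvOpsB r p).map Prod.fst)
        = PySem.Set.update ((s.add (r.getD p.1 ("", "")).1).add (r.getD p.1 ("", "")).2)
            (L.flatMap fun p => (pvOpsB r p).map Prod.fst) := by
      rw [List.flatMap_cons, PySem.Set.update_eq_foldl, List.foldl_append,
        ← PySem.Set.update_eq_foldl]
      rfl
    rw [hLA, hLB, PySem.Set.add_of_mem hp]
    exact ih _ (fun q hq => by
      have := hs q (by simp [hq])
      exact (PySem.Set.mem_add _ _ _).mpr (Or.inl ((PySem.Set.mem_add _ _ _).mpr (Or.inl this))))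

-- per-key totals: A's ops (with the subtraction) plus the seeded counts equal the derived-only ops
lemma pv_sum_identity (r : PySem.Dict String (String × String)) (L : List (String × Int)) (k : String) :
    pvSumAt (L.flatMap (pvOpsA r)) k + pvSumAt L k = pvSumAt (L.flatMap (pvOpsB r)) k := by
  induction L with
  | nil => simp [pvSumAt]
  | cons p L ih =>
    rw [List.flatMap_cons, List.flatMap_cons, pvSumAt_append, pvSumAt_append]
    show pvSumAt (pvOpsA r p) k + _ + pvSumAt (p :: L) k = _
    simp only [pvOpsA, pvOpsB, pvSumAt]
    split_ifs <;> linarith [ih]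

-- A's final dict, characterised per key and in its key order
def pvFinal (r : PySem.Dict String (String × String)) (d : PySem.Dict String Int) : PySem.Dict String Int :=
  pvAddAll d (pvAddAll PySem.Dict.empty (d.items.flatMap (pvOpsA r))).items

lemma pvFinal_nodup (r : PySem.Dict String (String × String)) (d : PySem.Dict String Int)
    (hn : d.keys.Nodup) : (pvFinal r d).keys.Nodup :=
  nodup_keys_pvAddAll _ _ hn

lemma pvFinal_keys (r : PySem.Dict String (String × String)) (d : PySem.Dict String Int)
    (_hn : d.keys.Nodup) :
    (pvFinal r d).keys = PySem.Set.update d.keys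
      (d.items.flatMap fun p => (pvOpsB r p).map Prod.fst) := by
  have hUkeys : (pvAddAll PySem.Dict.empty (d.items.flatMap (pvOpsA r))).keys
      = PySem.Set.update ([] : PySem.Set String) ((d.items.flatMap (pvOpsA r)).map Prod.fst) := by
    rw [keys_pvAddAll, PySem.Dict.keys_empty]
  have hmem : ∀ p ∈ d.items, p.1 ∈ d.keys := fun p hp => List.mem_map_of_mem hp
  have hflatA : (d.items.flatMap (pvOpsA r)).map Prod.fst
      = d.items.flatMap (fun p => (pvOpsA r p).map Prod.fst) := by rw [List.map_flatMap]
  rw [pvFinal, keys_pvAddAll]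
  have hitems : (pvAddAll PySem.Dict.empty (d.items.flatMap (pvOpsA r))).items.map Prod.fst
      = (pvAddAll PySem.Dict.empty (d.items.flatMap (pvOpsA r))).keys := rfl
  rw [hitems, hUkeys, hflatA, pv_update_update]
  have hnil : PySem.Set.update d.keys ([] : List String) = d.keys := rfl
  rw [hnil]
  exact pv_update_cancel r d.items d.keys hmem

lemma pvFinal_getD (r : PySem.Dict String (String × String)) (d : PySem.Dict String Int)
    (hn : d.keys.Nodup) (k : String) :
    (pvFinal r d).getD k 0 = pvSumAt (d.items.flatMap (pvOpsB r)) k := by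
  have hUnodup : (pvAddAll PySem.Dict.empty (d.items.flatMap (pvOpsA r))).keys.Nodup :=
    nodup_keys_pvAddAll _ _ (by simp [PySem.Dict.keys_empty])
  rw [pvFinal, getD_pvAddAll, pvSumAt_items _ k hUnodup, getD_pvAddAll, PySem.Dict.getD_empty,
    ← pvSumAt_items d k hn]
  have := pv_sum_identity r d.items k
  linarith

-- the ported A update loop is the corresponding op-run
lemma pv_foldA (r : PySem.Dict String (String × String)) (L : List (String × Int)) :
    L.foldl (fun u p =>
        let ab := r.getD p.1 ("", "")
        ((u.modify p.1 0 (· - p.2)).modify ab.1 0 (· + p.2)).modify ab.2 0 (· + p.2))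
      PySem.Dict.empty
      = pvAddAll PySem.Dict.empty (L.flatMap (pvOpsA r)) := by
  rw [pvAddAll, List.foldl_flatMap]
  apply List.foldl_ext
  intro u p _
  simp [pvOpsA, pvStep, sub_eq_add_neg]

-- ===== B-side lemmas =====

-- the (order, present) pair stays equal-componented and tracks Set.update
lemma pv_pair_fold (l : List String) (s : PySem.Set String) :
    l.foldl (fun (st : List String × PySem.Set String) k =>
        if k ∈ st.2 then st else (st.1 ++ [k], st.2.add k)) (s, s)
      = (PySem.Set.update s l, PySem.Set.update s l) := by
  induction l generalizing s with
  | nil => rfl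
  | cons x l ih =>
    have hstep : PySem.Set.update s (x :: l) = PySem.Set.update (s.add x) l := rfl
    by_cases hx : x ∈ s
    · simp only [List.foldl_cons, if_pos hx, hstep, PySem.Set.add_of_mem hx, ih]
    · simp only [List.foldl_cons, if_neg hx, hstep, PySem.Set.add_of_not_mem hx]
      exact ih (s ++ [x])

-- B's order loop computes Set.update over the flattened derived-key stream
lemma pv_order_fold (r : PySem.Dict String (String × String)) (ks : List String)
    (s : PySem.Set String) :
    ks.foldl (fun (st : List String × PySem.Set String) old =>
        let ab := r.getD old ("", "")
        [ab.1, ab.2].foldl (fun st k =>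
            if k ∈ st.2 then st else (st.1 ++ [k], st.2.add k)) st) (s, s)
      = (PySem.Set.update s (ks.flatMap fun old =>
            [(r.getD old ("", "")).1, (r.getD old ("", "")).2]),
         PySem.Set.update s (ks.flatMap fun old =>
            [(r.getD old ("", "")).1, (r.getD old ("", "")).2])) := by
  induction ks generalizing s with
  | nil => rfl
  | cons old ks ih =>
    rw [List.foldl_cons, List.flatMap_cons]
    show ks.foldl _ ([(r.getD old ("", "")).1, (r.getD old ("", "")).2].foldl
        (fun (st : List String × PySem.Set String) k =>
          if k ∈ st.2 then st else (st.1 ++ [k], st.2.add k)) (s, s)) = _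
    rw [pv_pair_fold [(r.getD old ("", "")).1, (r.getD old ("", "")).2] s, ih,
      PySem.Set.update_append]


-- the derived-key stream over keys equals the fst-projection of the opsB stream over items
lemma pv_keys_stream (r : PySem.Dict String (String × String)) (d : PySem.Dict String Int) :
    (d.keys.flatMap fun old => [(r.getD old ("", "")).1, (r.getD old ("", "")).2])
      = d.items.flatMap fun p => (pvOpsB r p).map Prod.fst := by
  have h : d.keys = d.items.map Prod.fst := rfl
  rw [h, List.flatMap_map]
  rfl

-- B's gather fold computes the per-key total of the opsB stream
lemma pv_gather_fold (r : PySem.Dict String (String × String)) (L : List (String × Int))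
    (k : String) (acc : Int) :
    L.foldl (fun s p =>
        let ab := r.getD p.1 ("", "")
        s + p.2 * ((if ab.1 = k then (1 : Int) else 0) + (if ab.2 = k then (1 : Int) else 0))) acc
      = acc + pvSumAt (L.flatMap (pvOpsB r)) k := by
  induction L generalizing acc with
  | nil => simp [pvSumAt]
  | cons p L ih =>
    rw [List.foldl_cons, ih, List.flatMap_cons, pvSumAt_append]
    simp only [pvOpsB, pvSumAt]
    split_ifs <;> ring

-- B's result-building loop is a filter of a map
lemma pv_build_fold (l : List String) (g : String → Int) (acc : List (String × Int)) :
    l.foldl (fun res k => if g k ≠ 0 then res ++ [(k, g k)] else res) acc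
      = acc ++ (l.map (fun k => (k, g k))).filter (fun p => p.2 != 0) := by
  induction l generalizing acc with
  | nil => simp
  | cons x l ih =>
    rw [List.foldl_cons, List.map_cons, List.filter_cons]
    by_cases hx : g x ≠ 0
    · rw [if_pos hx, ih]
      simp [hx]
    · rw [if_neg hx, ih]
      simp at hx
      simp [hx]

-- ===== VERDICT (by name: the statement is the Claim_ definition above) =====
theorem solve_spec : Claim_equal_solve := by
  intro data rules _hdom _hpre
  unfold Spec_solve
  show solve data rules = solve_alt data rules
  simp only [solve, solve_alt]
  set r : PySem.Dict String (String × String) := PySem.Dict.ofList rules with hr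
  set d : PySem.Dict String Int := PySem.Dict.ofList data with hd
  have hn : d.keys.Nodup := PySem.Dict.nodup_keys_ofList data
  -- A side: rewrite to pvFinal and then to a filtered map over its keys
  rw [pv_foldA r d.items,
    show ∀ (e : PySem.Dict String Int) l,
        List.foldl (fun r q => r.modify q.1 0 (· + q.2)) e l = pvAddAll e l from fun _ _ => rfl]
  have hA : (pvAddAll d (pvAddAll PySem.Dict.empty (d.items.flatMap (pvOpsA r))).items).items
      = (PySem.Set.update d.keys (d.items.flatMap fun p => (pvOpsB r p).map Prod.fst)).map
          (fun k => (k, pvSumAt (d.items.flatMap (pvOpsB r)) k)) := by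
    have h1 : pvAddAll d (pvAddAll PySem.Dict.empty (d.items.flatMap (pvOpsA r))).items
        = pvFinal r d := rfl
    rw [h1, PySem.Dict.items_eq_map_keys (pvFinal r d) (pvFinal_nodup r d hn) 0,
      pvFinal_keys r d hn]
    exact List.map_congr_left (fun k _ => by rw [pvFinal_getD r d hn k])
  rw [hA]
  -- B side: the order fold yields the same key list; the gather fold the same values
  have hofl : PySem.Set.ofList d.keys = d.keys := by
    rw [show (PySem.Set.ofList d.keys : PySem.Set String)
        = PySem.Set.update ([] : PySem.Set String) d.keys from rfl]
    exact pv_update_of_disjoint_nodup d.keys ([] : PySem.Set String) (by simpa using hn)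
  conv_rhs => rw [show (d.keys, PySem.Set.ofList d.keys)
      = ((d.keys : List String), (d.keys : PySem.Set String)) from by rw [hofl]]
  rw [pv_order_fold r d.keys d.keys, pv_keys_stream r d]
  have hgather : ∀ k : String,
      (d.items.foldl (fun s p =>
          let ab := r.getD p.1 ("", "")
          s + p.2 * ((if ab.1 = k then (1 : Int) else 0) + (if ab.2 = k then (1 : Int) else 0))) 0)
        = pvSumAt (d.items.flatMap (pvOpsB r)) k := fun k => by
    rw [pv_gather_fold r d.items k 0]; ring
  symm
  rw [List.foldl_ext _ (fun res k =>
        if pvSumAt (d.items.flatMap (pvOpsB r)) k ≠ 0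
          then res ++ [(k, pvSumAt (d.items.flatMap (pvOpsB r)) k)] else res) []
      (fun a k _ => by simp only [hgather k]),
    pv_build_fold (PySem.Set.update d.keys (d.items.flatMap fun p => (pvOpsB r p).map Prod.fst))
      (fun k => pvSumAt (d.items.flatMap (pvOpsB r)) k) []]
  rfl
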